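-- pv_equiv track=rewrite | github.com/bliscosque/PythonCompetenceDevelopment | hackerrank/algorithms/greedy/02-marcs_cakewalk.py | marcsCakewalk
-- ===== SOURCE A (Python) =====
-- def marcsCakewalk(calorie):
--     calorie.sort(reverse=True)
--     sum=0
--     multip=1
--     for n in calorie:
--         sum+=n*multip
--         multip*=2
--     return sum
-- ===== SOURCE B (Python) =====
-- def marcsCakewalk(calorie):
--     calorie.sort(reverse=True)
--     s = 0
--     for n in reversed(calorie):
--         s = s * 2 + n
--     return s
-- ===== Notes on version B (the rewrite author's own statement) =====
-- stated objective: alternative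
-- what changed: Replaces the explicit power-of-two multiplier accumulator with Horner's method over the reversed sorted list (s = s*2 + n).
import Mathlib
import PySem

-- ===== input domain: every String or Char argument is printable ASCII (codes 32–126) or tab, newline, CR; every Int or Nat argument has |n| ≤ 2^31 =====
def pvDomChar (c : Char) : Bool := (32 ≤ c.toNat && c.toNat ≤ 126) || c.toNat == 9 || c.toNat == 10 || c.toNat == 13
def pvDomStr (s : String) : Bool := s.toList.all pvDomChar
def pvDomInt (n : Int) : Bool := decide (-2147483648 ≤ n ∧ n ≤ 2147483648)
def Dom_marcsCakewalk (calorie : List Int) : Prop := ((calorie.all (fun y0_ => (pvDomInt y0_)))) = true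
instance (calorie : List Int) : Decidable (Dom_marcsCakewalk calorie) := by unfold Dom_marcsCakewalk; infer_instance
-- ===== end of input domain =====

-- B computes the same total by Horner's method over the reversed sorted list instead of a power-of-two multiplier.
-- Both A and B sort the argument in place (same mutation); the equivalence proved is about the return value.


-- ===== PORT A =====
def marcsCakewalk (calorie : List Int) : Int :=
  let sortedCal := PySem.List.sorted calorie (fun x => x) true
  (sortedCal.foldl (fun (p : Int × Int) n => (p.1 + n * p.2, p.2 * 2)) (0, 1)).1

-- ===== PORT B =====
def marcsCakewalk_alt (calorie : List Int) : Int :=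
  let sortedCal := PySem.List.sorted calorie (fun x => x) true
  sortedCal.reverse.foldl (fun s n => s * 2 + n) 0

-- ===== PRECONDITION & SPEC =====
def Spec_marcsCakewalk (calorie : List Int) (out : Int) : Prop := out = marcsCakewalk_alt calorie
instance (calorie : List Int) (out : Int) : Decidable (Spec_marcsCakewalk calorie out) := by unfold Spec_marcsCakewalk; infer_instance

-- ===== CLAIM (what is proved, stated in full; the proofs are below) =====
def Claim_equal_marcsCakewalk : Prop := ∀ (calorie : List Int), Dom_marcsCakewalk calorie → Spec_marcsCakewalk calorie (marcsCakewalk calorie)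

-- ===== LEMMAS AND PROOFS =====
theorem horner_cons (n : Int) (t : List Int) :
    (n :: t).reverse.foldl (fun s m => s * 2 + m) 0
      = 2 * (t.reverse.foldl (fun s m => s * 2 + m) 0) + n := by
  simp [List.reverse_cons, List.foldl_append]; ring

theorem loop_eq_horner (l : List Int) : ∀ (s m : Int),
    (l.foldl (fun (p : Int × Int) n => (p.1 + n * p.2, p.2 * 2)) (s, m)).1
      = s + m * (l.reverse.foldl (fun s m => s * 2 + m) 0) := by
  induction l with
  | nil => intro s m; simp
  | cons n t ih =>
      intro s m
      simp only [List.foldl_cons]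
      rw [ih, horner_cons]
      ring

-- ===== VERDICT (by name: the statement is the Claim_ definition above) =====
theorem marcsCakewalk_spec : Claim_equal_marcsCakewalk := by
  intro calorie _
  unfold Spec_marcsCakewalk marcsCakewalk marcsCakewalk_alt
  simpa using loop_eq_horner (PySem.List.sorted calorie (fun x => x) true) 0 1
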